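-- pv_equiv track=rewrite | github.com/jsierrahoopshype/nba-trade-rumor-rankings | fix_trade_rumors_players.py | build_last_name_index
-- ===== SOURCE A (Python) =====
-- def build_last_name_index(names):
--     """
--     Map last name -> set of full names, so we can fall back on last-name matches.
--     """
--     last_map = {}
--     for full in names:
--         parts = full.split()
--         if len(parts) < 2:
--             continue
--         last = parts[-1].lower()
--         last_map.setdefault(last, set()).add(full)
--     return last_map
-- ===== SOURCE B (Python) =====
-- def build_last_name_index(names):
--     """
--     Map last name -> set of full names, so we can fall back on last-name matches.
--     """
--     pairs = []
--     for full in names: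
--         parts = full.split()
--         if len(parts) >= 2:
--             pairs.append((parts[-1].lower(), full))
--     order = list(dict.fromkeys(last for last, _ in pairs))
--     return {last: {full for l, full in pairs if l == last} for last in order}
-- ===== Notes on version B (the rewrite author's own statement) =====
-- stated objective: alternative
-- what changed: Replaces the single streaming setdefault-into-dict pass with a two-phase decomposition: first materialise the (last, full) key pairs, then dedup the keys in first-appearance order and build each group by a per-key scan of the pair list.
import Mathlib
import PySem

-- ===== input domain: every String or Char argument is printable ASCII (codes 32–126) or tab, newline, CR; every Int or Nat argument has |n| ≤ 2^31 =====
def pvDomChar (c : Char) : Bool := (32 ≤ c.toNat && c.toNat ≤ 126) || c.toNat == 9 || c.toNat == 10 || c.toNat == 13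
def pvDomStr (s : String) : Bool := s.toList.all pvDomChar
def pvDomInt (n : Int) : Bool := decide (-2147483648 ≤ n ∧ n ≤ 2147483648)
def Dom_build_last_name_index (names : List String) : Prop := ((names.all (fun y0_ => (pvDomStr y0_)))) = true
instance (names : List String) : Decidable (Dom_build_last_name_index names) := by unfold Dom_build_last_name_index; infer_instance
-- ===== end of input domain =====

-- B rebuilds the same last-name index in two phases (collect key pairs, then group per
-- deduplicated key) instead of A's single streaming setdefault pass; objective: alternative.

-- ===== PORT A =====
-- streaming pass: last_map.setdefault(last, set()).add(full) ≡ d[last] = d.get(last, set()) ∪ {full}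
def build_last_name_index (names : List String) : List (String × List String) :=
  (names.foldl (fun d full =>
      let parts := PySem.Str.split₀ full
      if parts.length < 2 then d
      else
        let last := PySem.Str.lower (PySem.List.pyGetD parts (-1) "")
        d.modify last PySem.Set.empty (fun s => PySem.Set.add s full))
    PySem.Dict.empty).items
  -- parts[-1] is in range because parts.length ≥ 2 here, so pyGetD's default is never used

-- ===== PORT B =====
def build_last_name_index_alt (names : List String) : List (String × List String) :=
  let pairs := names.foldl (fun acc full =>
      let parts := PySem.Str.split₀ full
      if parts.length ≥ 2 then
        acc ++ [(PySem.Str.lower (PySem.List.pyGetD parts (-1) ""), full)]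
      else acc) []
  let order := PySem.List.dedup (pairs.map (fun p => p.1))
  order.map (fun last =>
    (last, PySem.Set.ofList ((pairs.filter (fun p => p.1 == last)).map (fun p => p.2))))

-- ===== PRECONDITION & SPEC =====
def Spec_build_last_name_index (names : List String) (out : List (String × List String)) : Prop := out = build_last_name_index_alt names
instance (names : List String) (out : List (String × List String)) : Decidable (Spec_build_last_name_index names out) := by unfold Spec_build_last_name_index; infer_instance

-- ===== CLAIM (what is proved, stated in full; the proofs are below) =====
def Claim_equal_build_last_name_index : Prop := ∀ (names : List String), Dom_build_last_name_index names → Spec_build_last_name_index names (build_last_name_index names)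

-- ===== LEMMAS AND PROOFS =====

-- the list of (last, full) pairs both programs are about
def pvPairs (names : List String) : List (String × String) :=
  names.filterMap (fun full =>
    let parts := PySem.Str.split₀ full
    if parts.length < 2 then none
    else some (PySem.Str.lower (PySem.List.pyGetD parts (-1) ""), full))

-- B's accumulation loop produces pvPairs
theorem pvPairs_acc (names : List String) (acc : List (String × String)) :
    names.foldl (fun acc full =>
      let parts := PySem.Str.split₀ full
      if parts.length ≥ 2 then
        acc ++ [(PySem.Str.lower (PySem.List.pyGetD parts (-1) ""), full)]
      else acc) acc = acc ++ pvPairs names := by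
  induction names generalizing acc with
  | nil => simp [pvPairs]
  | cons full t ih =>
    simp only [List.foldl_cons, pvPairs, List.filterMap_cons]
    by_cases h : (PySem.Str.split₀ full).length < 2
    · have h2 : ¬ (PySem.Str.split₀ full).length ≥ 2 := by omega
      simp only [h, h2, if_pos]
      exact ih acc
    · have h2 : (PySem.Str.split₀ full).length ≥ 2 := by omega
      simp only [h, h2, if_pos]
      rw [ih]
      simp [pvPairs]

-- A's loop over names is the pair loop over pvPairs
theorem foldA_eq (names : List String) (d : PySem.Dict String (PySem.Set String)) :
    names.foldl (fun d full =>
      let parts := PySem.Str.split₀ full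
      if parts.length < 2 then d
      else
        let last := PySem.Str.lower (PySem.List.pyGetD parts (-1) "")
        d.modify last PySem.Set.empty (fun s => PySem.Set.add s full)) d
    = (pvPairs names).foldl
        (fun d p => d.modify p.1 PySem.Set.empty (fun s => PySem.Set.add s p.2)) d := by
  induction names generalizing d with
  | nil => simp [pvPairs]
  | cons full t ih =>
    simp only [List.foldl_cons, pvPairs, List.filterMap_cons]
    by_cases h : (PySem.Str.split₀ full).length < 2
    · simp only [h, if_pos]
      exact ih d
    · simp only [h]
      exact ih _

-- what the pair loop holds at each key
theorem getD_pairFold (l : List (String × String)) (d : PySem.Dict String (PySem.Set String))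
    (k : String) :
    (l.foldl (fun d p => d.modify p.1 PySem.Set.empty (fun s => PySem.Set.add s p.2)) d).getD
        k PySem.Set.empty
    = PySem.Set.update (d.getD k PySem.Set.empty)
        ((l.filter (fun p => p.1 == k)).map (fun p => p.2)) := by
  induction l generalizing d with
  | nil => simp [PySem.Set.update]
  | cons p t ih =>
    simp only [List.foldl_cons, List.filter_cons]
    by_cases h : p.1 = k
    · simp only [h, beq_self_eq_true, if_pos, List.map_cons]
      rw [ih]
      rw [PySem.Dict.getD_modify, if_pos rfl]
      rfl
    · have hb : (p.1 == k) = false := by simp [h]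
      simp only [hb, Bool.false_eq_true, if_neg, not_false_eq_true]
      rw [ih]
      rw [PySem.Dict.getD_modify]
      rw [if_neg (by exact fun hk => h hk.symm)]

theorem build_eq (names : List String) :
    build_last_name_index names = build_last_name_index_alt names := by
  unfold build_last_name_index build_last_name_index_alt
  rw [foldA_eq, pvPairs_acc]
  simp only [List.nil_append]
  set l := pvPairs names with hl
  have hkeys :
      ((l.foldl (fun d p => d.modify p.1 PySem.Set.empty (fun s => PySem.Set.add s p.2))
        PySem.Dict.empty).keys)
      = PySem.List.dedup (l.map (fun p => p.1)) := by
    rw [PySem.Dict.keys_foldl_modify_key l (fun p => p.1) PySem.Set.empty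
      (fun d p => fun s => PySem.Set.add s p.2) PySem.Dict.empty]
    rw [PySem.List.dedup_eq_ofList]
    rfl
  have hnd :
      ((l.foldl (fun d p => d.modify p.1 PySem.Set.empty (fun s => PySem.Set.add s p.2))
        PySem.Dict.empty).keys).Nodup := by
    exact PySem.Dict.nodup_keys_foldl_modify_key l (fun p => p.1) PySem.Set.empty
      (fun d p => fun s => PySem.Set.add s p.2) PySem.Dict.empty (by simp)
  rw [PySem.Dict.items_eq_map_keys _ hnd PySem.Set.empty, hkeys]
  apply List.map_congr_left
  intro k _
  rw [getD_pairFold]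
  simp [PySem.Dict.getD_empty, PySem.Set.update, PySem.Set.ofList]

-- ===== VERDICT (by name: the statement is the Claim_ definition above) =====
theorem build_last_name_index_spec : Claim_equal_build_last_name_index := by
  intro names _
  unfold Spec_build_last_name_index
  exact build_eq names
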